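-- pv_equiv track=rewrite | github.com/MrSpYr0/Marienbad-game | marienbad-game.py | maximal
-- ===== SOURCE A (Python) =====
-- def maximal(l_c):                       #cherche le couple tel que le deuxieme membres du couples
--     maxi = l_c[0][1]                    #soit le maximal de la liste de couple
--     couple = l_c[0]
--     for i in range(len(l_c)):
--         if maxi <= l_c[i][1]:
--             maxi = l_c[i] [1]
--             couple = l_c[i]
--     return couple
-- ===== SOURCE B (Python) =====
-- def maximal(l_c):
--     # Stable sort by second component; last element is the last-occurring pair
--     # with the maximal second component (matches A's '<=' last-wins tie-break).
--     return sorted(l_c, key=lambda p: p[1])[-1]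
-- ===== Notes on version B (the rewrite author's own statement) =====
-- stated objective: simpler
-- what changed: Replaced the index loop with running max/couple state by a one-line stable sort on the second component followed by taking the last element; stability preserves A's last-wins '<=' tie-break.
import Mathlib
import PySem

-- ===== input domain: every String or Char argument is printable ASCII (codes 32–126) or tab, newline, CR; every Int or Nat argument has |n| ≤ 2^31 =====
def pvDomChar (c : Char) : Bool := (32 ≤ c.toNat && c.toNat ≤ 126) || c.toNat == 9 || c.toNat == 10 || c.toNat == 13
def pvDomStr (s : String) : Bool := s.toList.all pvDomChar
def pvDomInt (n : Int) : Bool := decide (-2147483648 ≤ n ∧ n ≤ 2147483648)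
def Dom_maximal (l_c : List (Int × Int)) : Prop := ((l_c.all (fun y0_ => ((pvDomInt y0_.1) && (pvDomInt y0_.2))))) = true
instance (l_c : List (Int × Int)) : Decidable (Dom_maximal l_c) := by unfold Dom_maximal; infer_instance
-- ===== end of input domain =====

-- B replaces A's running-max index loop by a stable sort on the second component
-- followed by taking the last element (objective: simpler).

-- ===== PORT A =====
-- A: maxi = l_c[0][1]; couple = l_c[0]; for i in range(len(l_c)): if maxi <= l_c[i][1]: update; return couple
def maximal (l_c : List (Int × Int)) : Int × Int :=
  let d : Int × Int := (0, 0)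
  let maxi : Int := (PySem.List.pyGetD l_c 0 d).2
  let couple : Int × Int := PySem.List.pyGetD l_c 0 d
  let r := (PySem.List.pyRange 0 (l_c.length : Int) 1).foldl
    (fun (s : Int × (Int × Int)) i =>
      let p := PySem.List.pyGetD l_c i d
      if s.1 ≤ p.2 then (p.2, p) else s)
    (maxi, couple)
  r.2

-- ===== PORT B =====
-- B: return sorted(l_c, key=lambda p: p[1])[-1]
def maximal_alt (l_c : List (Int × Int)) : Int × Int :=
  PySem.List.pyGetD (PySem.List.sorted l_c (fun p => p.2) false) (-1) (0, 0)

-- ===== PRECONDITION & SPEC =====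
-- Pre_ excludes the empty list, on which A raises IndexError (l_c[0]) and B raises IndexError ([][-1]).
def Pre_maximal (l_c : List (Int × Int)) : Prop := l_c ≠ []
instance (l_c : List (Int × Int)) : Decidable (Pre_maximal l_c) := by unfold Pre_maximal; infer_instance
def pvWitness_maximal : (List (Int × Int)) := [(1, 2), (3, 2)]

def Spec_maximal (l_c : List (Int × Int)) (out : Int × Int) : Prop := out = maximal_alt l_c
instance (l_c : List (Int × Int)) (out : Int × Int) : Decidable (Spec_maximal l_c out) := by unfold Spec_maximal; infer_instance

-- ===== CLAIM (what is proved, stated in full; the proofs are below) =====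
def Claim_equal_maximal : Prop := ∀ (l_c : List (Int × Int)), Dom_maximal l_c → Pre_maximal l_c → Spec_maximal l_c (maximal l_c)

-- ===== LEMMAS AND PROOFS =====

-- A's loop body, acting on the couple only (the maxi component is determined by it)
def pvStep (c p : Int × Int) : Int × Int := if c.2 ≤ p.2 then p else c

-- A's state (maxi, couple) always satisfies maxi = couple.2
theorem pv_fold_pair (xs : List (Int × Int)) (c : Int × Int) :
    xs.foldl (fun (s : Int × (Int × Int)) p => if s.1 ≤ p.2 then (p.2, p) else s) (c.2, c)
      = ((xs.foldl pvStep c).2, xs.foldl pvStep c) := by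
  induction xs generalizing c with
  | nil => rfl
  | cons p xs ih =>
    simp only [List.foldl_cons, pvStep]
    by_cases h : c.2 ≤ p.2 <;> simp [h, ih]

theorem pv_insertBy_ne_nil (x : Int × Int) (s : List (Int × Int))
    (b : Int × Int → Int × Int → Bool) :
    PySem.List.insertBy b x s ≠ [] := by
  cases s with
  | nil => simp [PySem.List.insertBy]
  | cons y ys => simp only [PySem.List.insertBy]; split <;> simp

-- last element of a Python stable insertion into a sorted list
theorem pv_last_insertBy (x : Int × Int) (s : List (Int × Int)) (d : Int × Int)
    (hs : s ≠ []) (hp : s.Pairwise (fun a b => a.2 ≤ b.2)) :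
    (PySem.List.insertBy (fun a b => decide (a.2 < b.2)) x s).getLastD d
      = if x.2 < (s.getLastD d).2 then s.getLastD d else x := by
  induction s with
  | nil => exact absurd rfl hs
  | cons y ys ih =>
    rcases List.pairwise_cons.mp hp with ⟨hy, hys⟩
    simp only [PySem.List.insertBy]
    by_cases hxy : x.2 < y.2
    · have hlast : x.2 < ((y :: ys).getLastD d).2 := by
        cases ys with
        | nil => simpa using hxy
        | cons z zs =>
          have hmem : (z :: zs).getLastD d ∈ z :: zs := by
            rw [List.getLastD_eq_getLast?, List.getLast?_eq_some_getLast (l := z :: zs) (by simp)]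
            exact List.getLast_mem _
          have := hy _ hmem
          calc x.2 < y.2 := hxy
            _ ≤ _ := this
      rw [if_pos hlast]
      simp [hxy, List.getLastD_eq_getLast?, List.getLast?_cons_cons]
    · simp only [hxy, decide_false, Bool.false_eq_true, if_false]
      cases ys with
      | nil =>
        simp [PySem.List.insertBy, hxy]
      | cons z zs =>
        have h1 : (y :: PySem.List.insertBy (fun a b => decide (a.2 < b.2)) x (z :: zs)).getLastD d
            = (PySem.List.insertBy (fun a b => decide (a.2 < b.2)) x (z :: zs)).getLastD d := by
          rcases List.exists_cons_of_ne_nil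
            (pv_insertBy_ne_nil x (z :: zs) (fun a b => decide (a.2 < b.2))) with ⟨w, ws, hw⟩
          simp [hw]
        rw [h1, ih (by simp) hys]
        simp

-- pyGetD at -1 on a nonempty list is the last element
theorem pv_pyGetD_neg_one (s : List (Int × Int)) (d : Int × Int) (hs : s ≠ []) :
    PySem.List.pyGetD s (-1) d = s.getLastD d := by
  cases s with
  | nil => exact absurd rfl hs
  | cons y ys =>
    simp [PySem.List.pyGetD, PySem.List.pyGet?, PySem.List.pyIdx?,
      List.getLastD_eq_getLast?, List.getLast?_eq_getElem?]

-- the main loop/sort correspondence, by induction from the right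
theorem pv_main (l : List (Int × Int)) (h : l ≠ []) :
    l.foldl pvStep (l.headD (0, 0)) = (PySem.List.sorted l (fun p => p.2) false).getLastD (0, 0) := by
  induction l using List.reverseRecOn with
  | nil => exact absurd rfl h
  | append_singleton ys x ih =>
    rcases eq_or_ne ys [] with rfl | hys
    · simp only [List.nil_append, List.headD_cons, List.foldl_cons, List.foldl_nil, pvStep,
        le_refl, if_true]
      rw [PySem.List.sorted_eq_of_perm_of_pairwise_lt (ys := [x]) [x] _ (List.Perm.refl _)
        (List.pairwise_singleton _ _)]
      rfl
    · rcases List.exists_cons_of_ne_nil hys with ⟨y, ys', rfl⟩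
      have hsorted : PySem.List.sorted ((y :: ys') ++ [x]) (fun p => p.2) false
          = PySem.List.insertBy (fun a b => decide (a.2 < b.2)) x
              (PySem.List.sorted (y :: ys') (fun p => p.2) false) := by
        rw [PySem.List.sorted_eq_foldl_insertBy, PySem.List.sorted_eq_foldl_insertBy,
          List.foldl_append]
        rfl
      have hne : PySem.List.sorted (y :: ys') (fun p => p.2) false ≠ [] := by
        simp [PySem.List.sorted_eq_nil_iff]
      rw [hsorted, pv_last_insertBy x _ _ hne (PySem.List.sorted_pairwise _ _),
        ← ih (by simp)]
      simp only [List.cons_append, List.headD_cons, List.foldl_append, List.foldl_cons,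
        List.foldl_nil]
      unfold pvStep
      split_ifs with h1 h2 <;> first | rfl | omega

-- ===== VERDICT (by name: the statement is the Claim_ definition above) =====
theorem maximal_spec : Claim_equal_maximal := by
  intro l_c _ hpre
  unfold Spec_maximal maximal maximal_alt
  rcases List.exists_cons_of_ne_nil hpre with ⟨y, ys, rfl⟩
  rw [pv_pyGetD_neg_one _ _ (by simp [PySem.List.sorted_eq_nil_iff])]
  simp only []
  rw [PySem.List.foldl_pyRange_zero_pyGetD' (y :: ys) (0, 0)
    (fun (s : Int × (Int × Int)) p => if s.1 ≤ p.2 then (p.2, p) else s) _]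
  have h0 : PySem.List.pyGetD (y :: ys) 0 (0, 0) = y := by
    simp [PySem.List.pyGetD, PySem.List.pyGet?, PySem.List.pyIdx?]
  rw [h0, pv_fold_pair]
  exact pv_main (y :: ys) (by simp)
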